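-- pv_equiv track=rewrite | github.com/eliminmax/advent-of-code | 2019/day04/part2.py | has_pair
-- ===== SOURCE A (Python) =====
-- from itertools import pairwise
--
-- def has_pair(s: str) -> bool:
--     pairs: list[str] = list("".join((a, b)) for a, b in pairwise(s))
--     for i, pair in enumerate(pairs):
--         if pairs[i + 1 :] and pair == pairs[i + 1]:
--             continue
--         if i and pair == pairs[i - 1]:
--             continue
--         a = pair[0]
--         b = pair[1]
--         if a == b:
--             return True
--     return False
-- ===== SOURCE B (Python) =====
-- def has_pair(s: str) -> bool:
--     # single pass run-length counting: True iff some maximal run has length exactly 2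
--     prev = None
--     run = 0
--     for ch in s:
--         if ch == prev:
--             run += 1
--         else:
--             if run == 2:
--                 return True
--             prev = ch
--             run = 1
--     return run == 2
-- ===== Notes on version B (the rewrite author's own statement) =====
-- stated objective: faster
-- what changed: Replaced A's pair-list construction with neighbour comparisons and slicing by a single-pass run-length scan that returns True as soon as a maximal run of length exactly 2 ends.
import Mathlib
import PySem

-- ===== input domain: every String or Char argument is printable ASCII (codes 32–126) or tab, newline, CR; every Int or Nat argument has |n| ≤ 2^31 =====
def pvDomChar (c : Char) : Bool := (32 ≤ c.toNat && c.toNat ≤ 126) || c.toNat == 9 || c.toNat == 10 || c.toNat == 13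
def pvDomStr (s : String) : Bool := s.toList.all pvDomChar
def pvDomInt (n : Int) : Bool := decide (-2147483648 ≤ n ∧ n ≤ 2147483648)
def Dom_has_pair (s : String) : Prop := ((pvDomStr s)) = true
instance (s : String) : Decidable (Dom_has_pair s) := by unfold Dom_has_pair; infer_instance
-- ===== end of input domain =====

-- B replaces A's pair list + slicing (quadratic) by a single-pass run-length scan (linear).

-- ===== PORT A =====
-- '"".join((a, b))' for a pair of consecutive chars
def mkPairStr (a b : Char) : String := String.ofList [a, b]

-- 'list("".join((a, b)) for a, b in pairwise(s))'
def hasPairPairs (cs : List Char) : List String :=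
  (cs.zip cs.tail).map (fun ab => mkPairStr ab.1 ab.2)

-- the 'for i, pair in enumerate(pairs)' loop; `rest` is 'pairs[i+1:]' and
-- `prev` is 'pairs[i-1]' when i > 0 (none at i = 0), so the two 'continue'
-- guards are transcribed verbatim against rest's head and prev.
def hasPairLoop : Option String → List String → Bool
  | _, [] => false                                           -- loop ends: 'return False'
  | prev, pair :: rest =>
    if some pair == rest.head? then        -- 'if pairs[i+1:] and pair == pairs[i+1]: continue' (slice nonempty ∧ equal to its head)
      hasPairLoop (some pair) rest
    else if some pair == prev then         -- 'if i and pair == pairs[i-1]: continue' (prev exists ∧ equal)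
      hasPairLoop (some pair) rest
    else if PySem.Str.pyGet? pair 0 == PySem.Str.pyGet? pair 1 then  -- 'a = pair[0]; b = pair[1]; if a == b: return True'
      true
    else hasPairLoop (some pair) rest

def has_pair (s : String) : Bool := hasPairLoop none (hasPairPairs s.toList)

-- ===== PORT B =====
-- single pass over the chars with (prev, run) state; returns true as soon as a
-- maximal run of length exactly 2 ends, and checks the final run at the end.
def hasPairRun : Option Char → Nat → List Char → Bool
  | _, run, [] => run == 2
  | prev, run, ch :: rest =>
    if some ch == prev then hasPairRun prev (run + 1) rest
    else if run == 2 then true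
    else hasPairRun (some ch) 1 rest

def has_pair_alt (s : String) : Bool := hasPairRun none 0 s.toList

-- ===== PRECONDITION & SPEC =====
def Spec_has_pair (s : String) (out : Bool) : Prop := out = has_pair_alt s
instance (s : String) (out : Bool) : Decidable (Spec_has_pair s out) := by unfold Spec_has_pair; infer_instance

-- ===== CLAIM (what is proved, stated in full; the proofs are below) =====
def Claim_equal_has_pair : Prop := ∀ (s : String), Dom_has_pair s → Spec_has_pair s (has_pair s)

-- ===== LEMMAS AND PROOFS =====

lemma mkPairStr_beq (a b c d : Char) :
    (mkPairStr a b == mkPairStr c d) = (a == c && b == d) := by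
  apply Bool.eq_iff_iff.mpr
  simp [mkPairStr, String.ofList_inj, and_comm]

lemma hasPairPairs_cons (a c : Char) (t : List Char) :
    hasPairPairs (a :: c :: t) = mkPairStr a c :: hasPairPairs (c :: t) := rfl

lemma pyGet_pair (a b : Char) :
    (PySem.Str.pyGet? (mkPairStr a b) 0 == PySem.Str.pyGet? (mkPairStr a b) 1) = (a == b) := by
  simp [mkPairStr, PySem.Str.pyGet?, PySem.List.pyGet?, PySem.List.pyIdx?]

-- the head of the pair list built from c :: t starts with c
lemma head_hasPairPairs_ne (a c : Char) (h : (a == c) = false) (t : List Char) :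
    (some (mkPairStr a c) == (hasPairPairs (c :: t)).head?) = false := by
  cases t with
  | nil => rfl
  | cons d t' => simp [hasPairPairs_cons, mkPairStr_beq, h]

-- prev is consulted only against the first pair; an impossible prev equals none
lemma hasPairLoop_prev_irrel (l : List String) (p : String)
    (h : (l.head?.map (fun q => q == p)).getD false = false) :
    hasPairLoop (some p) l = hasPairLoop none l := by
  cases l with
  | nil => rfl
  | cons q rest =>
    simp only [List.head?_cons, Option.map_some, Option.getD_some] at h
    simp only [hasPairLoop, Option.some_beq_some, Option.some_beq_none, h]
    rfl

-- run invariant: B in state (prev = a, run = n ≥ 1, remaining t) corresponds to A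
-- holding a pending pair (a,a) when n ≥ 2, with prev pair (a,a) when n ≥ 3.
lemma run_invariant : ∀ (t : List Char) (a : Char) (n : Nat), 1 ≤ n →
    hasPairLoop (if 3 ≤ n then some (mkPairStr a a) else none)
      ((if 2 ≤ n then [mkPairStr a a] else []) ++ hasPairPairs (a :: t))
    = hasPairRun (some a) n t := by
  intro t
  induction t with
  | nil =>
    intro a n hn
    show hasPairLoop _ ((if 2 ≤ n then [mkPairStr a a] else []) ++ []) = (n == 2)
    rcases Nat.lt_or_ge n 2 with h2 | h2
    · have h1 : n = 1 := by omega
      subst h1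
      simp [hasPairLoop]
    · rcases Nat.lt_or_ge n 3 with h3 | h3
      · have h1 : n = 2 := by omega
        subst h1
        simp [hasPairLoop, mkPairStr, PySem.List.pyGet?, PySem.List.pyIdx?]
      · have hne : (n == 2) = false := by simp; omega
        rw [hne, if_pos h2, if_pos h3]
        simp [hasPairLoop]
  | cons c t' ih =>
    intro a n hn
    by_cases hc : c = a
    · subst hc
      have hstep : hasPairRun (some c) n (c :: t') = hasPairRun (some c) (n + 1) t' := by
        simp [hasPairRun]
      rw [hstep, ← ih c (n + 1) (by omega), hasPairPairs_cons]
      rcases Nat.lt_or_ge n 2 with h2 | h2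
      · have h1 : n = 1 := by omega
        subst h1
        norm_num
      · rcases Nat.lt_or_ge n 3 with h3 | h3
        · have h1 : n = 2 := by omega
          subst h1
          norm_num
          simp [hasPairLoop]
        · rw [if_pos h2, if_pos h3, if_pos (show 2 ≤ n + 1 by omega), if_pos (show 3 ≤ n + 1 by omega)]
          simp [hasPairLoop]
    · have hca : (c == a) = false := by simp [hc]
      have hac : (a == c) = false := by simp [Ne.symm hc]
      have hstep : hasPairRun (some a) n (c :: t') =
          (if n == 2 then true else hasPairRun (some c) 1 t') := by
        simp only [hasPairRun, Option.some_beq_some, hca, Bool.false_eq_true, if_false]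
      rw [hstep, hasPairPairs_cons]
      -- processing the boundary pair (a,c) leads to B's fresh state (c, 1, t')
      have hbound : hasPairLoop none (mkPairStr a c :: hasPairPairs (c :: t'))
          = hasPairRun (some c) 1 t' := by
        have htail := ih c 1 (by omega)
        rw [if_neg (by omega), if_neg (by omega), List.nil_append] at htail
        rw [← htail]
        simp only [hasPairLoop, head_hasPairPairs_ne a c hac t', Option.some_beq_none,
          Bool.false_eq_true, if_false, pyGet_pair, hac]
        apply hasPairLoop_prev_irrel
        cases t' with
        | nil => rfl
        | cons d t'' => simp [hasPairPairs_cons, mkPairStr_beq, hca]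
      rcases Nat.lt_or_ge n 2 with h2 | h2
      · have h1 : n = 1 := by omega
        subst h1
        simpa using hbound
      · rcases Nat.lt_or_ge n 3 with h3 | h3
        · have h1 : n = 2 := by omega
          subst h1
          -- pending (a,a): next pair (a,c) differs, prev is none, a == a → True
          rw [if_neg (by omega), if_pos (by omega)]
          simp only [hasPairLoop, List.singleton_append, List.head?_cons, Option.some_beq_some,
            Option.some_beq_none, mkPairStr_beq, hac, Bool.and_false, Bool.false_eq_true, if_false,
            BEq.rfl]
          simp [mkPairStr, PySem.List.pyGet?, PySem.List.pyIdx?]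
        · have hne : (n == 2) = false := by simp; omega
          rw [hne, if_pos h2, if_pos h3]
          -- the pending (a,a) is skipped by the prev guard, then the boundary pair runs
          have s1 : hasPairLoop (some (mkPairStr a a))
              (mkPairStr a a :: mkPairStr a c :: hasPairPairs (c :: t'))
              = hasPairLoop (some (mkPairStr a a)) (mkPairStr a c :: hasPairPairs (c :: t')) := by
            simp [hasPairLoop, mkPairStr_beq, hac]
          have s2 : hasPairLoop (some (mkPairStr a a)) (mkPairStr a c :: hasPairPairs (c :: t'))
              = hasPairLoop none (mkPairStr a c :: hasPairPairs (c :: t')) :=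
            hasPairLoop_prev_irrel _ _ (by simp [mkPairStr_beq, hca])
          rw [List.singleton_append, s1, s2, hbound]
          simp

-- ===== VERDICT (by name: the statement is the Claim_ definition above) =====
theorem has_pair_spec : Claim_equal_has_pair := by
  intro s _
  show has_pair s = has_pair_alt s
  unfold has_pair has_pair_alt
  cases h : s.toList with
  | nil => rfl
  | cons a t =>
    have hstart : hasPairRun none 0 (a :: t) = hasPairRun (some a) 1 t := by
      simp [hasPairRun]
    rw [hstart, ← run_invariant t a 1 (by omega)]
    norm_num
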